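-- pv_equiv track=rewrite | github.com/awslabs/mcp | src/mssql-mcp-server/awslabs/mssql_mcp_server/server.py | _parse_identifier_parts
-- ===== SOURCE A (Python) =====
-- from typing import Annotated, Any, Dict, List, Optional, Tuple
--
-- def _parse_identifier_parts(table_name: str) -> Optional[list[str]]:
--     """Parse a possibly-qualified SQL Server table name into its identifier parts.
--
--     Supports both double-quoted ("name") and bracket-quoted ([name]) identifiers.
--     """
--     parts = []
--     pos = 0
--     length = len(table_name)
--
--     while pos < length:
--         if table_name[pos] == '"':
--             # Double-quoted identifier
--             pos += 1
--             content = []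
--             while pos < length:
--                 ch = table_name[pos]
--                 if ch == '\0':
--                     return None
--                 if ch == '"':
--                     if pos + 1 < length and table_name[pos + 1] == '"':
--                         content.append('"')
--                         pos += 2
--                     else:
--                         pos += 1
--                         break
--                 else:
--                     content.append(ch)
--                     pos += 1
--             else:
--                 return None
--             identifier = ''.join(content)
--             if not identifier:
--                 return None
--             parts.append(identifier)
--
--         elif table_name[pos] == '[':
--             # Bracket-quoted identifier (SQL Server style)
--             pos += 1
--             content = []
--             while pos < length:
--                 ch = table_name[pos]
--                 if ch == '\0':
--                     return None
--                 if ch == ']':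
--                     if pos + 1 < length and table_name[pos + 1] == ']':
--                         content.append(']')
--                         pos += 2
--                     else:
--                         pos += 1
--                         break
--                 else:
--                     content.append(ch)
--                     pos += 1
--             else:
--                 return None
--             identifier = ''.join(content)
--             if not identifier:
--                 return None
--             parts.append(identifier)
--
--         else:
--             ch = table_name[pos]
--             if not (ch.isalpha() or ch == '_'):
--                 return None
--             start = pos
--             pos += 1
--             while pos < length:
--                 ch = table_name[pos]
--                 if ch.isalpha() or ch.isdigit() or ch in ('_', '$', '#', '@'):
--                     pos += 1
--                 else:
--                     break
--             parts.append(table_name[start:pos])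
--
--         if pos < length:
--             if table_name[pos] == '.':
--                 pos += 1
--                 if pos >= length:
--                     return None
--             else:
--                 return None
--
--     return parts if parts else None
-- ===== SOURCE B (Python) =====
-- from typing import Optional
--
-- # States of the one-pass DFA
-- EXPECT, DQ, DQC, BR, BRC, WORD, DOT = range(7)
--
--
-- def _is_word_char(c: str) -> bool:
--     return c.isalpha() or c.isdigit() or c in ('_', '$', '#', '@')
--
--
-- def _parse_identifier_parts(table_name: str) -> Optional[list[str]]:
--     """One-pass deterministic state machine over the characters."""
--     state = EXPECT
--     buf: list[str] = []
--     parts: list[str] = []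
--     for c in table_name:
--         if state == EXPECT or state == DOT:
--             if c == '"':
--                 state, buf = DQ, []
--             elif c == '[':
--                 state, buf = BR, []
--             elif c.isalpha() or c == '_':
--                 state, buf = WORD, [c]
--             else:
--                 return None
--         elif state == DQ:
--             if c == '\0':
--                 return None
--             if c == '"':
--                 state = DQC
--             else:
--                 buf.append(c)
--         elif state == DQC:
--             if c == '"':
--                 buf.append('"')
--                 state = DQ
--             elif c == '.':
--                 if not buf:
--                     return None
--                 parts.append(''.join(buf))
--                 state, buf = DOT, []
--             else:
--                 return None
--         elif state == BR:
--             if c == '\0':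
--                 return None
--             if c == ']':
--                 state = BRC
--             else:
--                 buf.append(c)
--         elif state == BRC:
--             if c == ']':
--                 buf.append(']')
--                 state = BR
--             elif c == '.':
--                 if not buf:
--                     return None
--                 parts.append(''.join(buf))
--                 state, buf = DOT, []
--             else:
--                 return None
--         else:  # WORD
--             if _is_word_char(c):
--                 buf.append(c)
--             elif c == '.':
--                 parts.append(''.join(buf))
--                 state, buf = DOT, []
--             else:
--                 return None
--     if state in (DQC, BRC):
--         if not buf:
--             return None
--         parts.append(''.join(buf))
--         return parts
--     if state == WORD:
--         parts.append(''.join(buf))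
--         return parts
--     return None  # EXPECT (empty input), DOT (trailing dot), DQ/BR (unterminated)
-- ===== Notes on version B (the rewrite author's own statement) =====
-- stated objective: alternative
-- what changed: Replaced A's index-based outer while-loop with two duplicated inline quote-scanning inner loops and slice-based word scanning by a single-pass deterministic finite state machine: one for-loop over the characters driving an explicit 7-state automaton (expect/in-quote/after-quote-close x2, in-word, after-dot) with a buffer and parts accumulator, doubled closing quotes handled by the state pair instead of lookahead.
import Mathlib
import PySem

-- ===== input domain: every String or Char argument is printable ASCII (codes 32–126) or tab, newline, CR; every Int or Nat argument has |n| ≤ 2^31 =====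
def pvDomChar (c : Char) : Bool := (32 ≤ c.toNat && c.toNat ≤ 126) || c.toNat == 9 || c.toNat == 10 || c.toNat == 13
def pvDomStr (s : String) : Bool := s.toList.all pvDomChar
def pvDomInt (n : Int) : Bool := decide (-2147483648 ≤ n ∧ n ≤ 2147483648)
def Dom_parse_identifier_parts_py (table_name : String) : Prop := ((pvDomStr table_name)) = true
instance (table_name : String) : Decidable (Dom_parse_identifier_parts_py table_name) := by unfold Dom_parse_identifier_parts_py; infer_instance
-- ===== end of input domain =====

-- B replaces A's index-based nested while-loops by a single-pass deterministic state machine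
-- (one fold over the characters with an explicit 7-state enum); objective: alternative algorithm,
-- same behaviour.

-- ===== PORT A =====
-- A's inner double-quote loop: content accumulator, returns (content, rest-after-closing-quote);
-- none = the '\0' return or the while-else (unterminated).  pos arithmetic is rendered as list consumption.
def pvScanDQ (r : List Char) (content : List Char) : Option (List Char × List Char) :=
  match r with
  | [] => none
  | ch :: r1 =>
    if ch = '\x00' then none
    else if ch = '"' then
      match r1 with
      | c2 :: r2 => if c2 = '"' then pvScanDQ r2 (content ++ ['"']) else some (content, r1)
      | [] => some (content, r1)
    else pvScanDQ r1 (content ++ [ch])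

-- A's inner bracket loop (duplicated in the source, duplicated here).
def pvScanBR (r : List Char) (content : List Char) : Option (List Char × List Char) :=
  match r with
  | [] => none
  | ch :: r1 =>
    if ch = '\x00' then none
    else if ch = ']' then
      match r1 with
      | c2 :: r2 => if c2 = ']' then pvScanBR r2 (content ++ [']']) else some (content, r1)
      | [] => some (content, r1)
    else pvScanBR r1 (content ++ [ch])

def pvIsWordChar (c : Char) : Bool :=
  PySem.Chars.isalpha c || PySem.Chars.isdigit c || c == '_' || c == '$' || c == '#' || c == '@'

-- A's unquoted loop advances pos over word chars then slices; rendered as counting the prefix length.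
def pvWordLen (r : List Char) : Nat :=
  match r with
  | [] => 0
  | ch :: r1 => if pvIsWordChar ch then 1 + pvWordLen r1 else 0

theorem pvScanDQ_len_le (r : List Char) (content : List Char) :
    ∀ p ∈ pvScanDQ r content, p.2.length ≤ r.length := by
  fun_induction pvScanDQ r content <;> intro p hp <;>
    first
      | (rename_i ih; have h2 := ih p hp; simp only [List.length_cons]; omega)
      | (simp at hp; rw [← hp]; simp only [List.length_cons]; simp; try omega)
      | simp [pvScanDQ] at hp

theorem pvScanBR_len_le (r : List Char) (content : List Char) :
    ∀ p ∈ pvScanBR r content, p.2.length ≤ r.length := by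
  fun_induction pvScanBR r content <;> intro p hp <;>
    first
      | (rename_i ih; have h2 := ih p hp; simp only [List.length_cons]; omega)
      | (simp at hp; rw [← hp]; simp only [List.length_cons]; simp; try omega)
      | simp [pvScanBR] at hp

-- A's outer while-loop over the remaining input, carrying the parts accumulator.
def pvLoopA (r : List Char) (parts : List String) : Option (List String) :=
  match r with
  | [] => if parts.isEmpty then none else some parts
  | c :: r1 =>
    if c = '"' then
      match hs : pvScanDQ r1 [] with
      | none => none
      | some (content, r2) =>
        if content.isEmpty then none
        else
          match hr2 : r2 with
          | [] => pvLoopA [] (parts ++ [String.mk content])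
          | d :: r3 =>
            if d = '.' then
              if r3.isEmpty then none else pvLoopA r3 (parts ++ [String.mk content])
            else none
    else if c = '[' then
      match hs : pvScanBR r1 [] with
      | none => none
      | some (content, r2) =>
        if content.isEmpty then none
        else
          match hr2 : r2 with
          | [] => pvLoopA [] (parts ++ [String.mk content])
          | d :: r3 =>
            if d = '.' then
              if r3.isEmpty then none else pvLoopA r3 (parts ++ [String.mk content])
            else none
    else
      if PySem.Chars.isalpha c || c == '_' then
        match hr2 : r1.drop (pvWordLen r1) with
        | [] => pvLoopA [] (parts ++ [String.mk (c :: r1.take (pvWordLen r1))])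
        | d :: r3 =>
          if d = '.' then
            if r3.isEmpty then none
            else pvLoopA r3 (parts ++ [String.mk (c :: r1.take (pvWordLen r1))])
          else none
      else none
termination_by r.length
decreasing_by
  · simp
  · have h2 := pvScanDQ_len_le r1 [] (content, d :: r3) (by simp [hs])
    simp at h2; simp; omega
  · simp
  · have h2 := pvScanBR_len_le r1 [] (content, d :: r3) (by simp [hs])
    simp at h2; simp; omega
  · simp
  · have h2 : (r1.drop (pvWordLen r1)).length ≤ r1.length := by simp
    rw [hr2] at h2; simp at h2; simp; omega

def parse_identifier_parts_py (table_name : String) : Option (List String) :=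
  pvLoopA table_name.toList []

-- ===== PORT B =====
-- the 7 DFA states of Source B's single pass
inductive PvSt : Type
| expect | dq | dqc | br | brc | word | dot
deriving DecidableEq, Repr

-- the EXPECT/DOT branch: start of an identifier
def pvStartB (c : Char) (parts : List String) : Option (PvSt × List Char × List String) :=
  if c = '"' then some (.dq, [], parts)
  else if c = '[' then some (.br, [], parts)
  else if PySem.Chars.isalpha c || c == '_' then some (.word, [c], parts)
  else none

-- one DFA transition (none = Source B's early `return None`)
def pvStepB (s : PvSt × List Char × List String) (c : Char) : Option (PvSt × List Char × List String) :=
  match s with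
  | (.expect, _, parts) => pvStartB c parts
  | (.dot, _, parts) => pvStartB c parts
  | (.dq, buf, parts) =>
    if c = '\x00' then none
    else if c = '"' then some (.dqc, buf, parts)
    else some (.dq, buf ++ [c], parts)
  | (.dqc, buf, parts) =>
    if c = '"' then some (.dq, buf ++ ['"'], parts)
    else if c = '.' then
      if buf.isEmpty then none else some (.dot, [], parts ++ [String.mk buf])
    else none
  | (.br, buf, parts) =>
    if c = '\x00' then none
    else if c = ']' then some (.brc, buf, parts)
    else some (.br, buf ++ [c], parts)
  | (.brc, buf, parts) =>
    if c = ']' then some (.br, buf ++ [']'], parts)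
    else if c = '.' then
      if buf.isEmpty then none else some (.dot, [], parts ++ [String.mk buf])
    else none
  | (.word, buf, parts) =>
    if pvIsWordChar c then some (.word, buf ++ [c], parts)
    else if c = '.' then some (.dot, [], parts ++ [String.mk buf])
    else none

-- Source B's end-of-input handling
def pvFinishB (s : PvSt × List Char × List String) : Option (List String) :=
  match s with
  | (.dqc, buf, parts) => if buf.isEmpty then none else some (parts ++ [String.mk buf])
  | (.brc, buf, parts) => if buf.isEmpty then none else some (parts ++ [String.mk buf])
  | (.word, buf, parts) => some (parts ++ [String.mk buf])
  | _ => none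

def parse_identifier_parts_py_alt (table_name : String) : Option (List String) :=
  (table_name.toList.foldl (fun a c => a.bind (fun s => pvStepB s c))
      (some (PvSt.expect, ([] : List Char), ([] : List String)))).bind pvFinishB

-- ===== PRECONDITION & SPEC =====
def Spec_parse_identifier_parts_py (table_name : String) (out : Option (List String)) : Prop := out = parse_identifier_parts_py_alt table_name
instance (table_name : String) (out : Option (List String)) : Decidable (Spec_parse_identifier_parts_py table_name out) := by unfold Spec_parse_identifier_parts_py; infer_instance

-- ===== CLAIM (what is proved, stated in full; the proofs are below) =====
def Claim_equal_parse_identifier_parts_py : Prop := ∀ (table_name : String), Dom_parse_identifier_parts_py table_name → Spec_parse_identifier_parts_py table_name (parse_identifier_parts_py table_name)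

-- ===== LEMMAS AND PROOFS =====

-- run the DFA from state s over r, then finish
def pvRunB (r : List Char) (s : PvSt × List Char × List String) : Option (List String) :=
  (r.foldl (fun a c => a.bind (fun s => pvStepB s c)) (some s)).bind pvFinishB

theorem pvFold_none (r : List Char) :
    r.foldl (fun a c => a.bind (fun s => pvStepB s c)) (none : Option (PvSt × List Char × List String)) = none := by
  induction r <;> simp_all [List.foldl]

theorem pvRunB_nil (s : PvSt × List Char × List String) : pvRunB [] s = pvFinishB s := by
  simp [pvRunB]

theorem pvRunB_cons (c : Char) (r : List Char) (s : PvSt × List Char × List String) :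
    pvRunB (c :: r) s = (pvStepB s c).bind (fun s' => pvRunB r s') := by
  cases h : pvStepB s c <;> simp [pvRunB, List.foldl, h, pvFold_none]

theorem pvScanDQ_rest_head (r : List Char) (content : List Char) :
    ∀ p ∈ pvScanDQ r content, ∀ d r3, p.2 = d :: r3 → d ≠ '"' := by
  fun_induction pvScanDQ r content with
  | case1 content => intro p hp; simp at hp
  | case2 content r1 => intro p hp; simp at hp
  | case3 content r2 h ih => exact ih
  | case4 content c2 r2 h1 h =>
      intro p hp d r3 hd
      simp at hp; rw [← hp] at hd; simp at hd
      exact hd.1 ▸ h1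
  | case5 content h =>
      intro p hp d r3 hd
      simp at hp; rw [← hp] at hd; simp at hd
  | case6 content ch r1 h1 h ih => exact ih

theorem pvScanBR_rest_head (r : List Char) (content : List Char) :
    ∀ p ∈ pvScanBR r content, ∀ d r3, p.2 = d :: r3 → d ≠ ']' := by
  fun_induction pvScanBR r content with
  | case1 content => intro p hp; simp at hp
  | case2 content r1 => intro p hp; simp at hp
  | case3 content r2 h ih => exact ih
  | case4 content c2 r2 h1 h =>
      intro p hp d r3 hd
      simp at hp; rw [← hp] at hd; simp at hd
      exact hd.1 ▸ h1
  | case5 content h =>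
      intro p hp d r3 hd
      simp at hp; rw [← hp] at hd; simp at hd
  | case6 content ch r1 h1 h ih => exact ih

-- the DFA from state dq simulates A's double-quote scanner
theorem pvRunB_dq (r : List Char) (buf : List Char) (parts : List String) :
    pvRunB r (.dq, buf, parts) =
      match pvScanDQ r buf with
      | none => none
      | some (content, rest) => pvRunB rest (.dqc, content, parts) := by
  fun_induction pvScanDQ r buf with
  | case1 buf => simp [pvRunB_nil, pvFinishB]
  | case2 buf r1 =>
      rw [pvRunB_cons]
      simp [pvStepB]
  | case3 buf r2 h ih =>
      rw [pvRunB_cons]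
      simp only [pvStepB, Char.reduceEq, reduceIte, Option.bind_some]
      rw [pvRunB_cons]
      simp only [pvStepB, Char.reduceEq, reduceIte, Option.bind_some]
      exact ih
  | case4 buf c2 r2 h1 h =>
      rw [pvRunB_cons]
      simp [pvStepB]
  | case5 buf h =>
      rw [pvRunB_cons]
      simp [pvStepB]
  | case6 buf ch r1 h1 h ih =>
      have hs : pvStepB (.dq, buf, parts) ch = some (.dq, buf ++ [ch], parts) := by
        simp only [pvStepB, if_neg h1, if_neg h]
      rw [pvRunB_cons, hs, Option.bind_some]
      exact ih

-- the DFA from state br simulates A's bracket scanner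
theorem pvRunB_br (r : List Char) (buf : List Char) (parts : List String) :
    pvRunB r (.br, buf, parts) =
      match pvScanBR r buf with
      | none => none
      | some (content, rest) => pvRunB rest (.brc, content, parts) := by
  fun_induction pvScanBR r buf with
  | case1 buf => simp [pvRunB_nil, pvFinishB]
  | case2 buf r1 =>
      rw [pvRunB_cons]
      simp [pvStepB]
  | case3 buf r2 h ih =>
      rw [pvRunB_cons]
      simp only [pvStepB, Char.reduceEq, reduceIte, Option.bind_some]
      rw [pvRunB_cons]
      simp only [pvStepB, Char.reduceEq, reduceIte, Option.bind_some]
      exact ih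
  | case4 buf c2 r2 h1 h =>
      rw [pvRunB_cons]
      simp [pvStepB]
  | case5 buf h =>
      rw [pvRunB_cons]
      simp [pvStepB]
  | case6 buf ch r1 h1 h ih =>
      have hs : pvStepB (.br, buf, parts) ch = some (.br, buf ++ [ch], parts) := by
        simp only [pvStepB, if_neg h1, if_neg h]
      rw [pvRunB_cons, hs, Option.bind_some]
      exact ih

-- the DFA from state word simulates A's word-prefix scan
theorem pvRunB_word (r : List Char) (buf : List Char) (parts : List String) :
    pvRunB r (.word, buf, parts) =
      match r.drop (pvWordLen r) with
      | [] => some (parts ++ [String.mk (buf ++ r.take (pvWordLen r))])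
      | d :: r3 =>
        if d = '.' then pvRunB r3 (.dot, [], parts ++ [String.mk (buf ++ r.take (pvWordLen r))])
        else none := by
  induction r generalizing buf with
  | nil => simp [pvRunB_nil, pvFinishB, pvWordLen]
  | cons c r1 ih =>
      by_cases hw : pvIsWordChar c
      · have hs : pvStepB (.word, buf, parts) c = some (.word, buf ++ [c], parts) := by
          simp only [pvStepB, if_pos hw]
        rw [pvRunB_cons, hs, Option.bind_some, ih (buf ++ [c])]
        simp [pvWordLen, hw, Nat.add_comm 1]
      · rw [pvRunB_cons]
        simp only [pvWordLen, if_neg hw, List.drop_zero, List.take_zero, List.append_nil]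
        by_cases hc : c = '.'
        · subst hc
          have hs : pvStepB (.word, buf, parts) '.' = some (.dot, [], parts ++ [String.mk buf]) := by
            simp only [pvStepB, if_neg hw]
            rfl
          rw [hs, Option.bind_some]
          simp
        · have hs : pvStepB (.word, buf, parts) c = none := by
            simp only [pvStepB, if_neg hw, if_neg hc]
          rw [hs, Option.bind_none]
          simp [hc]

-- non-dependent restatement of pvLoopA's cons equation (its raw equation is dependent
-- because the match discriminants are named for the termination proof)
theorem pvLoopA_cons (c : Char) (r1 : List Char) (parts : List String) :
    pvLoopA (c :: r1) parts =
      if c = '"' then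
        match pvScanDQ r1 [] with
        | none => none
        | some (content, r2) =>
          if content.isEmpty then none
          else
            match r2 with
            | [] => pvLoopA [] (parts ++ [String.mk content])
            | d :: r3 =>
              if d = '.' then
                if r3.isEmpty then none else pvLoopA r3 (parts ++ [String.mk content])
              else none
      else if c = '[' then
        match pvScanBR r1 [] with
        | none => none
        | some (content, r2) =>
          if content.isEmpty then none
          else
            match r2 with
            | [] => pvLoopA [] (parts ++ [String.mk content])
            | d :: r3 =>
              if d = '.' then
                if r3.isEmpty then none else pvLoopA r3 (parts ++ [String.mk content])
              else none
      else
        if PySem.Chars.isalpha c || c == '_' then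
          match r1.drop (pvWordLen r1) with
          | [] => pvLoopA [] (parts ++ [String.mk (c :: r1.take (pvWordLen r1))])
          | d :: r3 =>
            if d = '.' then
              if r3.isEmpty then none
              else pvLoopA r3 (parts ++ [String.mk (c :: r1.take (pvWordLen r1))])
            else none
        else none := by
  rw [pvLoopA.eq_def]
  by_cases hq : c = '"'
  · simp only [if_pos hq]
    split <;> rename_i h <;> simp only [h] <;> (try split) <;>
      first
        | rfl
        | (rename_i cc rr hh; cases rr <;> rfl)
  · by_cases hb : c = '['
    · simp only [if_neg hq, if_pos hb]
      split <;> rename_i h <;> simp only [h] <;> (try split) <;>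
        first
          | rfl
          | (rename_i cc rr hh; cases rr <;> rfl)
    · simp only [if_neg hq, if_neg hb]
      by_cases hw : (PySem.Chars.isalpha c || c == '_') = true
      · simp only [if_pos hw]
        split <;> rename_i h <;> simp only [h]
      · simp only [if_neg hw]

theorem pvLoopA_nil (parts : List String) :
    pvLoopA [] parts = if parts.isEmpty then none else some parts := by
  rw [pvLoopA.eq_def]

-- main simulation: on nonempty remaining input, A's outer loop equals the DFA run from state dot
theorem pvLoopA_eq_runB (n : Nat) :
    ∀ (r : List Char) (parts : List String), r.length ≤ n → r ≠ [] →
      pvLoopA r parts = pvRunB r (.dot, [], parts) := by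
  induction n using Nat.strong_induction_on with
  | _ n ih =>
  intro r parts hlen hne
  match r with
  | [] => exact absurd rfl hne
  | c :: r1 =>
  rw [pvLoopA_cons, pvRunB_cons]
  by_cases hq : c = '"'
  · subst hq
    simp only [Char.reduceEq, reduceIte, pvStepB, pvStartB, Option.bind_some]
    rw [pvRunB_dq]
    cases hr : pvScanDQ r1 [] with
    | none => rfl
    | some q =>
      obtain ⟨content, rest⟩ := q
      simp only []
      cases rest with
      | nil =>
        rw [pvRunB_nil]
        simp only [pvFinishB, pvLoopA_nil]
        by_cases hc : content.isEmpty <;> simp [hc]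
      | cons d r3 =>
        have hd : d ≠ '"' := pvScanDQ_rest_head r1 [] (content, d :: r3) (by simp [hr]) d r3 rfl
        rw [pvRunB_cons]
        simp only [pvStepB, if_neg hd]
        by_cases hdot : d = '.'
        · simp only [if_pos hdot]
          by_cases hc : content.isEmpty
          · simp [hc]
          · simp only [if_neg hc, Bool.false_eq_true, if_false, Option.bind_some]
            cases r3 with
            | nil => simp [pvRunB_nil, pvFinishB]
            | cons e r4 =>
              have hlt : (e :: r4).length < n := by
                have h2 := pvScanDQ_len_le r1 [] (content, d :: e :: r4) (by simp [hr])
                simp at h2 hlen ⊢; omega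
              simp only [List.isEmpty_cons, Bool.false_eq_true, if_false]
              exact ih _ hlt _ _ (le_refl _) (by simp)
        · by_cases hc : content.isEmpty <;> simp [hc, hdot]
  · by_cases hb : c = '['
    · subst hb
      simp only [Char.reduceEq, reduceIte, pvStepB, pvStartB, Option.bind_some]
      rw [pvRunB_br]
      cases hr : pvScanBR r1 [] with
      | none => rfl
      | some q =>
        obtain ⟨content, rest⟩ := q
        simp only []
        cases rest with
        | nil =>
          rw [pvRunB_nil]
          simp only [pvFinishB, pvLoopA_nil]
          by_cases hc : content.isEmpty <;> simp [hc]
        | cons d r3 =>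
          have hd : d ≠ ']' := pvScanBR_rest_head r1 [] (content, d :: r3) (by simp [hr]) d r3 rfl
          rw [pvRunB_cons]
          simp only [pvStepB, if_neg hd]
          by_cases hdot : d = '.'
          · simp only [if_pos hdot]
            by_cases hc : content.isEmpty
            · simp [hc]
            · simp only [if_neg hc, Bool.false_eq_true, if_false, Option.bind_some]
              cases r3 with
              | nil => simp [pvRunB_nil, pvFinishB]
              | cons e r4 =>
                have hlt : (e :: r4).length < n := by
                  have h2 := pvScanBR_len_le r1 [] (content, d :: e :: r4) (by simp [hr])
                  simp at h2 hlen ⊢; omega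
                simp only [List.isEmpty_cons, Bool.false_eq_true, if_false]
                exact ih _ hlt _ _ (le_refl _) (by simp)
          · by_cases hc : content.isEmpty <;> simp [hc, hdot]
    · by_cases hw : (PySem.Chars.isalpha c || c == '_') = true
      · have hs : pvStepB (PvSt.dot, [], parts) c = some (.word, [c], parts) := by
          simp only [pvStepB, pvStartB, if_neg hq, if_neg hb, if_pos hw]
        rw [if_neg hq, if_neg hb, if_pos hw, hs, Option.bind_some, pvRunB_word]
        cases hr : r1.drop (pvWordLen r1) with
        | nil => simp [pvLoopA_nil]
        | cons d r3 =>
          simp only []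
          by_cases hdot : d = '.'
          · simp only [if_pos hdot]
            cases r3 with
            | nil => simp [pvRunB_nil, pvFinishB]
            | cons e r4 =>
              have hlt : (e :: r4).length < n := by
                have h2 : (r1.drop (pvWordLen r1)).length ≤ r1.length := by simp
                rw [hr] at h2; simp at h2 hlen ⊢; omega
              simp only [List.isEmpty_cons, Bool.false_eq_true, if_false]
              exact ih _ hlt _ _ (le_refl _) (by simp)
          · simp [hdot]
      · have hs : pvStepB (PvSt.dot, [], parts) c = none := by
          simp only [pvStepB, pvStartB, if_neg hq, if_neg hb, if_neg hw]
        rw [if_neg hq, if_neg hb, if_neg hw, hs, Option.bind_none]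

-- ===== VERDICT (by name: the statement is the Claim_ definition above) =====
theorem parse_identifier_parts_py_spec : Claim_equal_parse_identifier_parts_py := by
  intro t _
  unfold Spec_parse_identifier_parts_py parse_identifier_parts_py parse_identifier_parts_py_alt
  cases ht : t.toList with
  | nil => simp [pvLoopA_nil, pvFinishB]
  | cons c r1 =>
    have h1 : pvLoopA (c :: r1) [] = pvRunB (c :: r1) (.dot, [], []) :=
      pvLoopA_eq_runB (c :: r1).length _ _ (le_refl _) (by simp)
    have h2 : pvRunB (c :: r1) (.dot, [], []) = pvRunB (c :: r1) (.expect, [], []) := by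
      rw [pvRunB_cons, pvRunB_cons]; rfl
    rw [h1, h2]; rfl
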